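-- pv_equiv track=rewrite | github.com/orod-codes/code-protection- | check-one/universal_profile_app/engine.py | check_injection_record
-- ===== SOURCE A (Python) =====
-- from typing import Optional, Dict, Tuple, Callable, List
--
-- INJECTION_RECORD_MARKER = "__INJECTION_RECORD__:"
--
-- def check_injection_record(content: str) -> Tuple[bool, Optional[str]]:
--     """
--     Check if injection record exists in the code content.
--
--     Args:
--         content: File content as string
--
--     Returns:
--         Tuple of (record_exists, record_data)
--         If record exists, returns (True, encoded_record_data)
--         If not, returns (False, None)
--     """
--     lines = content.split('\n')
--
--     for line in lines:
--         stripped = line.strip()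
--         if INJECTION_RECORD_MARKER in stripped:
--             # Extract record data from marker line
--             record_data = stripped.split(INJECTION_RECORD_MARKER, 1)[1].strip()
--             return True, record_data
--
--     return False, None
-- ===== SOURCE B (Python) =====
-- from typing import Optional, Tuple
--
-- INJECTION_RECORD_MARKER = "__INJECTION_RECORD__:"
--
-- def check_injection_record(content: str) -> Tuple[bool, Optional[str]]:
--     idx = content.find(INJECTION_RECORD_MARKER)
--     if idx == -1:
--         return False, None
--     eol = content.find('\n', idx)
--     if eol == -1:
--         eol = len(content)
--     record_data = content[idx + len(INJECTION_RECORD_MARKER):eol].strip()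
--     return True, record_data
-- ===== Notes on version B (the rewrite author's own statement) =====
-- stated objective: alternative
-- what changed: B does not split the content into a list of lines and loop over it: it locates the marker once with str.find, finds the end of that line with a second bounded find for the line separator, and slices/strips the record data directly out of the original string.
import Mathlib
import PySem

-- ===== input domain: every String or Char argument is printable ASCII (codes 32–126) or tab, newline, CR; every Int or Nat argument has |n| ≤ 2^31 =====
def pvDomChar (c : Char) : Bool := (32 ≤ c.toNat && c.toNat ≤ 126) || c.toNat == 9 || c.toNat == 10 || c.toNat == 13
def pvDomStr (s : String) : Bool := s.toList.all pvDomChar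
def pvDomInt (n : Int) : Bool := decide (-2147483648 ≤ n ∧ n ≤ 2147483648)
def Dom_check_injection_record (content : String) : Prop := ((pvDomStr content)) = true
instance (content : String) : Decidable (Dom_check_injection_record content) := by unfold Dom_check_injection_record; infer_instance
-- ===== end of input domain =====

-- B replaces A's split-into-lines-and-loop by direct index arithmetic on the string
-- (find the marker once, find the line end, slice); same return value, no line list built.

-- INJECTION_RECORD_MARKER = "__INJECTION_RECORD__:"
def pvMarker : List Char := ['_','_','I','N','J','E','C','T','I','O','N','_','R','E','C','O','R','D','_','_',':']

-- ===== PORT A =====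
-- the 'for line in lines' loop; 'stripped.split(MARKER, 1)[1]': under the 'in' guard the
-- split always has ≥ 2 parts, so Python's [1] never raises and List.getD 1 [] is exact there.
def pvLoopA : List (List Char) → Bool × Option String
  | [] => (false, none)
  | line :: rest =>
    let stripped := PySem.Chars.strip line
    if PySem.Chars.isIn pvMarker stripped then
      let record := PySem.Chars.strip ((PySem.Chars.splitOnMax stripped pvMarker 1).getD 1 [])
      (true, some (String.ofList record))
    else pvLoopA rest

def check_injection_record (content : String) : Bool × Option String :=
  pvLoopA (PySem.Chars.splitOn content.toList ['\n'])

-- ===== PORT B =====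
-- B's body on the character list: find marker, find line end, slice, strip.
def pvBAux (cs : List Char) : Bool × Option String :=
  let idx := PySem.Chars.find cs pvMarker
  if idx = -1 then (false, none)
  else
    let eol0 := PySem.Chars.findFrom cs ['\n'] idx none
    let eol := if eol0 = -1 then (cs.length : Int) else eol0
    let record := PySem.Chars.strip (PySem.Chars.slice cs (some (idx + (pvMarker.length : Int))) (some eol))
    (true, some (String.ofList record))

def check_injection_record_alt (content : String) : Bool × Option String :=
  pvBAux content.toList

-- ===== PRECONDITION & SPEC =====
def Spec_check_injection_record (content : String) (out : Bool × Option String) : Prop := out = check_injection_record_alt content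
instance (content : String) (out : Bool × Option String) : Decidable (Spec_check_injection_record content out) := by unfold Spec_check_injection_record; infer_instance

-- ===== CLAIM (what is proved, stated in full; the proofs are below) =====
def Claim_equal_check_injection_record : Prop := ∀ (content : String), Dom_check_injection_record content → Spec_check_injection_record content (check_injection_record content)

-- ===== LEMMAS AND PROOFS =====

-- facts about the marker
lemma pvM_ne : pvMarker ≠ [] := by decide
lemma pvM_no_nl : '\n' ∉ pvMarker := by decide
lemma pvM_no_ws : ∀ c ∈ pvMarker, PySem.Chars.isspace c = false := by
  intro c hc; fin_cases hc <;> rfl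
lemma pv_ws_notin (c : Char) (hc : PySem.Chars.isspace c = true) : c ∉ pvMarker := by
  intro h; rw [pvM_no_ws c h] at hc; cases hc

-- find returns p when p is the first occurrence
lemma pv_find_eq_first (s sub : List Char) (p : Nat)
    (hp : sub <+: s.drop p) (hmin : ∀ i < p, ¬ sub <+: s.drop i) :
    PySem.Chars.find s sub = (p : Int) := by
  have hinf : sub <:+: s := ((hp.isInfix).trans (List.drop_suffix p s).isInfix)
  have h0 : 0 ≤ PySem.Chars.find s sub := (PySem.Chars.find_nonneg_iff s sub).2 hinf
  obtain ⟨h1, h2⟩ := PySem.Chars.find_spec h0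
  have : (PySem.Chars.find s sub).toNat = p := by
    rcases lt_trichotomy (PySem.Chars.find s sub).toNat p with h | h | h
    · exact absurd h1 (hmin _ h)
    · exact h
    · exact absurd hp (h2 _ h)
  omega

-- no occurrence of sub can straddle a char that is not in sub
lemma pv_prefix_append_mid (sub x y : List Char) (c : Char) (hc : c ∉ sub) :
    sub <+: x ++ c :: y ↔ sub <+: x := by
  constructor
  · intro h
    by_cases hl : sub.length ≤ x.length
    · have h2 : sub <+: (x ++ c :: y).take x.length := List.prefix_take_iff.2 ⟨h, hl⟩
      rwa [List.take_append, Nat.sub_self, List.take_zero, List.append_nil, List.take_length] at h2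
    · exfalso
      apply hc
      have : c ∈ (x ++ c :: y).take sub.length := by
        rw [List.take_append]
        refine List.mem_append.2 (Or.inr ?_)
        cases h' : sub.length - x.length with
        | zero => omega
        | succ n => simp
      have hsub : sub = (x ++ c :: y).take sub.length := List.prefix_iff_eq_take.1 h
      rw [hsub]; exact this
  · intro h; exact h.trans (List.prefix_append x (c :: y))

lemma pv_prefix_append_block (sub x w : List Char) (hw : ∀ c ∈ w, c ∉ sub) :
    sub <+: x ++ w ↔ sub <+: x := by
  cases w with
  | nil => simp
  | cons c w => exact pv_prefix_append_mid sub x w c (hw c (by simp))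

lemma pv_no_occ_ws_cons (c : Char) (hc : PySem.Chars.isspace c = true) (y : List Char) :
    ¬ pvMarker <+: c :: y := by
  intro h
  have := (pv_prefix_append_mid pvMarker [] y c (pv_ws_notin c hc)).1 (by simpa using h)
  exact pvM_ne (List.prefix_nil.1 this)

lemma pv_occ_drop_ws_left (w x : List Char) (hw : ∀ c ∈ w, PySem.Chars.isspace c = true) (i : Nat) :
    pvMarker <+: (w ++ x).drop i ↔ (w.length ≤ i ∧ pvMarker <+: x.drop (i - w.length)) := by
  by_cases hi : i < w.length
  · constructor
    · intro h
      exfalso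
      rw [List.drop_append, List.drop_eq_getElem_cons hi, List.cons_append] at h
      exact pv_no_occ_ws_cons _ (hw _ (List.getElem_mem hi)) _ h
    · intro h; omega
  · rw [List.drop_append, List.drop_eq_nil_of_le (by omega), List.nil_append]
    exact ⟨fun h => ⟨by omega, h⟩, fun h => h.2⟩

lemma pv_occ_drop_ws_right (t w : List Char) (hw : ∀ c ∈ w, PySem.Chars.isspace c = true) (j : Nat) :
    pvMarker <+: (t ++ w).drop j ↔ pvMarker <+: t.drop j := by
  rw [List.drop_append]
  have hblock : ∀ z : List Char, ∀ k, pvMarker <+: z ++ w.drop k ↔ pvMarker <+: z := by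
    intro z k
    exact pv_prefix_append_block pvMarker z (w.drop k)
      (fun c hc => pv_ws_notin c (hw c (List.mem_of_mem_drop hc)))
  by_cases hj : j ≤ t.length
  · rw [hblock]
  · rw [List.drop_eq_nil_of_le (by omega), hblock]

-- strip lemmas
lemma pv_rstrip_append_ws (x w : List Char) (hw : ∀ c ∈ w, PySem.Chars.isspace c = true) :
    PySem.Chars.rstrip (x ++ w) = PySem.Chars.rstrip x := by
  unfold PySem.Chars.rstrip
  rw [List.reverse_append, List.dropWhile_append]
  have : List.dropWhile PySem.Chars.isspace w.reverse = [] := by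
    rw [List.dropWhile_eq_nil_iff]
    intro c hc; exact hw c (List.mem_reverse.1 hc)
  simp [this]

lemma pv_strip_append_ws (x w : List Char) (hw : ∀ c ∈ w, PySem.Chars.isspace c = true) :
    PySem.Chars.strip (x ++ w) = PySem.Chars.strip x := by
  unfold PySem.Chars.strip PySem.Chars.lstrip
  rw [List.dropWhile_append]
  by_cases h : (List.dropWhile PySem.Chars.isspace x).isEmpty
  · have hx : List.dropWhile PySem.Chars.isspace x = [] := by simpa [List.isEmpty_iff] using h
    simp only [h, if_pos]
    rw [hx]
    have : List.dropWhile PySem.Chars.isspace w = [] := List.dropWhile_eq_nil_iff.2 hw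
    rw [this]
  · simp only [h, Bool.false_eq_true, if_false]
    exact pv_rstrip_append_ws _ w hw

lemma pv_strip_decomp (l : List Char) :
    ∃ w1 w2, (∀ c ∈ w1, PySem.Chars.isspace c = true) ∧ (∀ c ∈ w2, PySem.Chars.isspace c = true) ∧
      l = w1 ++ PySem.Chars.strip l ++ w2 := by
  refine ⟨l.takeWhile PySem.Chars.isspace,
    ((PySem.Chars.lstrip l).reverse.takeWhile PySem.Chars.isspace).reverse, ?_, ?_, ?_⟩
  · intro c hc; exact List.mem_takeWhile_imp hc
  · intro c hc; exact List.mem_takeWhile_imp (List.mem_reverse.1 hc)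
  · have h1 : l = l.takeWhile PySem.Chars.isspace ++ PySem.Chars.lstrip l :=
      (List.takeWhile_append_dropWhile).symm
    have h2 : PySem.Chars.lstrip l
        = PySem.Chars.strip l ++ ((PySem.Chars.lstrip l).reverse.takeWhile PySem.Chars.isspace).reverse := by
      unfold PySem.Chars.strip PySem.Chars.rstrip
      conv_lhs => rw [← List.reverse_reverse (PySem.Chars.lstrip l)]
      rw [← List.reverse_append]
      rw [← List.takeWhile_append_dropWhile (p := PySem.Chars.isspace) (l := (PySem.Chars.lstrip l).reverse)]
      simp
    rw [List.append_assoc, ← h2, ← h1]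

-- splitOnMax with budget 0 returns immediately
lemma pv_goM0 (sep : List Char) (fuel : Nat) (l cur : List Char) (acc : List (List Char)) :
    PySem.Chars.splitOnMax.go sep fuel 0 l cur acc = ((cur.reverse ++ l) :: acc).reverse := by
  cases fuel with
  | zero => rfl
  | succ f => cases l with
    | nil => simp [PySem.Chars.splitOnMax.go]
    | cons c t => simp [PySem.Chars.splitOnMax.go]

-- splitOnMax s sub 1 splits at the first occurrence p
lemma pv_goM1 (sub : List Char) (hne : sub ≠ []) (s : List Char) (p : Nat) (fuel : Nat)
    (hf : s.length ≤ fuel) (hp : sub <+: s.drop p) (hmin : ∀ i < p, ¬ sub <+: s.drop i)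
    (cur : List Char) (acc : List (List Char)) :
    PySem.Chars.splitOnMax.go sub fuel 1 s cur acc
      = acc.reverse ++ [cur.reverse ++ s.take p, s.drop (p + sub.length)] := by
  induction s generalizing fuel cur p with
  | nil => exact absurd (List.prefix_nil.1 (by simpa using hp)) hne
  | cons c t ih =>
    cases fuel with
    | zero => simp at hf
    | succ f =>
      cases p with
      | zero =>
        simp only [List.drop_zero] at hp
        have hpre : sub.isPrefixOf (c :: t) = true := List.isPrefixOf_iff_prefix.2 hp
        rw [PySem.Chars.splitOnMax.go]
        simp only [hpre, if_true]
        rw [if_neg (by omega)]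
        rw [pv_goM0]
        simp
      | succ q =>
        have hnp : ¬ sub <+: (c :: t) := by simpa using hmin 0 (by omega)
        have hpre : sub.isPrefixOf (c :: t) = false := by
          by_contra h
          exact hnp (List.isPrefixOf_iff_prefix.1 (by simpa using h))
        rw [PySem.Chars.splitOnMax.go]
        simp only [hpre, Bool.false_eq_true, if_false]
        rw [if_neg (by omega)]
        rw [ih q f (by simp at hf; omega) hp
          (fun i hi => by simpa using hmin (i+1) (by omega)) (c :: cur)]
        simp [Nat.succ_add]

lemma pv_splitOnMax_pair (sub : List Char) (hne : sub ≠ []) (s : List Char) (p : Nat)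
    (hp : sub <+: s.drop p) (hmin : ∀ i < p, ¬ sub <+: s.drop i) :
    PySem.Chars.splitOnMax s sub 1 = [s.take p, s.drop (p + sub.length)] := by
  unfold PySem.Chars.splitOnMax
  rw [if_neg (by omega)]
  rw [show (1:Int).toNat = 1 from rfl]
  rw [pv_goM1 sub hne s p (s.length + 1) (by omega) hp hmin [] []]
  simp

-- splitOn: the accumulator accumulates on the left
lemma pv_goS_acc (sep : List Char) (fuel : Nat) (l cur : List Char) (acc : List (List Char)) :
    PySem.Chars.splitOn.go sep fuel l cur acc = acc.reverse ++ PySem.Chars.splitOn.go sep fuel l cur [] := by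
  induction fuel generalizing l cur acc with
  | zero => simp [PySem.Chars.splitOn.go]
  | succ f ih =>
    cases l with
    | nil => simp [PySem.Chars.splitOn.go]
    | cons c t =>
      rw [PySem.Chars.splitOn.go, PySem.Chars.splitOn.go]
      by_cases hpre : sep.isPrefixOf (c :: t) = true
      · simp only [hpre, if_true]
        rw [ih _ _ (cur.reverse :: acc), ih _ _ [cur.reverse]]
        simp
      · simp only [hpre, Bool.false_eq_true, if_false]
        exact ih _ _ _

lemma pv_goS_no (c : Char) (l : List Char) (hc : c ∉ l) (fuel : Nat) (hf : l.length ≤ fuel)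
    (cur : List Char) (acc : List (List Char)) :
    PySem.Chars.splitOn.go [c] fuel l cur acc = ((cur.reverse ++ l) :: acc).reverse := by
  induction l generalizing fuel cur with
  | nil => cases fuel with
    | zero => rfl
    | succ f => simp [PySem.Chars.splitOn.go]
  | cons d t ih =>
    cases fuel with
    | zero => simp at hf
    | succ f =>
      have hd : d ≠ c := fun h => hc (by simp [h])
      have hpre : List.isPrefixOf [c] (d :: t) = false := by
        simp [List.isPrefixOf]; exact fun h => hd h.symm
      rw [PySem.Chars.splitOn.go]
      simp only [hpre, Bool.false_eq_true, if_false]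
      rw [ih (fun h => hc (by simp [h])) f (by simp at hf; omega) (d :: cur)]
      simp

lemma pv_splitOn_no (c : Char) (l : List Char) (hc : c ∉ l) :
    PySem.Chars.splitOn l [c] = [l] := by
  unfold PySem.Chars.splitOn
  rw [pv_goS_no c l hc _ (by omega)]
  simp

lemma pv_goS_found (c : Char) (l : List Char) (hc : c ∉ l) (rest : List Char) (fuel : Nat)
    (hf : (l ++ c :: rest).length ≤ fuel) (cur : List Char) (acc : List (List Char)) :
    PySem.Chars.splitOn.go [c] fuel (l ++ c :: rest) cur acc
      = PySem.Chars.splitOn.go [c] (fuel - l.length - 1) rest [] ((cur.reverse ++ l) :: acc) := by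
  induction l generalizing fuel cur with
  | nil =>
    cases fuel with
    | zero => simp at hf
    | succ f =>
      have hpre : List.isPrefixOf [c] (c :: rest) = true := by
        simp [List.isPrefixOf]
      rw [List.nil_append, PySem.Chars.splitOn.go]
      simp only [hpre, if_true]
      simp
  | cons d t ih =>
    cases fuel with
    | zero => simp at hf
    | succ f =>
      have hd : d ≠ c := fun h => hc (by simp [h])
      have hpre : List.isPrefixOf [c] (d :: (t ++ c :: rest)) = false := by
        simp [List.isPrefixOf]; exact fun h => hd h.symm
      rw [List.cons_append, PySem.Chars.splitOn.go]
      simp only [hpre, Bool.false_eq_true, if_false]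
      rw [ih (fun h => hc (by simp [h])) f (by simp at hf ⊢; omega) (d :: cur)]
      rw [show ((d :: cur).reverse ++ t) = cur.reverse ++ d :: t by simp]
      rw [show f + 1 - (d :: t).length - 1 = f - t.length - 1 by simp]

lemma pv_splitOn_cons (c : Char) (l rest : List Char) (hc : c ∉ l) :
    PySem.Chars.splitOn (l ++ c :: rest) [c] = l :: PySem.Chars.splitOn rest [c] := by
  unfold PySem.Chars.splitOn
  rw [pv_goS_found c l hc rest _ (by omega)]
  have : (l ++ c :: rest).length + 1 - l.length - 1 = rest.length + 1 := by simp; omega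
  rw [this, pv_goS_acc]
  simp

-- a string containing c splits as l ++ c :: rest with c ∉ l
lemma pv_split_first (c : Char) (cs : List Char) (h : c ∈ cs) :
    ∃ l rest, cs = l ++ c :: rest ∧ c ∉ l := by
  induction cs with
  | nil => simp at h
  | cons d t ih =>
    by_cases hd : d = c
    · exact ⟨[], t, by simp [hd], by simp⟩
    · obtain ⟨l, rest, h1, h2⟩ := ih (by rcases List.mem_cons.1 h with h | h; exact absurd h.symm hd; exact h)
      exact ⟨d :: l, rest, by simp [h1], by simp [h2]; exact fun hh => hd hh.symm⟩

-- the marker occurs in strip l iff it occurs in l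
lemma pv_occ_key (l w1 w2 : List Char) (hw1 : ∀ c ∈ w1, PySem.Chars.isspace c = true)
    (hw2 : ∀ c ∈ w2, PySem.Chars.isspace c = true)
    (hl : l = w1 ++ PySem.Chars.strip l ++ w2) (i : Nat) :
    pvMarker <+: l.drop i
      ↔ (w1.length ≤ i ∧ pvMarker <+: (PySem.Chars.strip l).drop (i - w1.length)) := by
  conv_lhs => rw [hl]
  rw [List.append_assoc, pv_occ_drop_ws_left w1 _ hw1 i, pv_occ_drop_ws_right _ w2 hw2]

lemma pv_infix_strip (l : List Char) :
    pvMarker <:+: PySem.Chars.strip l ↔ pvMarker <:+: l := by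
  obtain ⟨w1, w2, hw1, hw2, hl⟩ := pv_strip_decomp l
  rw [← PySem.Chars.isIn_iff_infix, ← PySem.Chars.exists_prefix_drop_iff_isIn,
      ← PySem.Chars.isIn_iff_infix, ← PySem.Chars.exists_prefix_drop_iff_isIn]
  constructor
  · rintro ⟨j, hj⟩
    exact ⟨w1.length + j, (pv_occ_key l w1 w2 hw1 hw2 hl _).2 ⟨by omega, by simpa using hj⟩⟩
  · rintro ⟨i, hi⟩
    exact ⟨i - w1.length, ((pv_occ_key l w1 w2 hw1 hw2 hl i).1 hi).2⟩

-- A's extraction on a hit line equals B's drop-based extraction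
lemma pv_extract_eq (l : List Char) (hin : pvMarker <:+: l) :
    PySem.Chars.strip ((PySem.Chars.splitOnMax (PySem.Chars.strip l) pvMarker 1).getD 1 [])
      = PySem.Chars.strip (l.drop ((PySem.Chars.find l pvMarker).toNat + pvMarker.length)) := by
  obtain ⟨w1, w2, hw1, hw2, hl⟩ := pv_strip_decomp l
  have hint : pvMarker <:+: PySem.Chars.strip l := (pv_infix_strip l).2 hin
  have h0 : 0 ≤ PySem.Chars.find (PySem.Chars.strip l) pvMarker :=
    (PySem.Chars.find_nonneg_iff _ _).2 hint
  obtain ⟨hq, hqmin⟩ := PySem.Chars.find_spec h0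
  set q := (PySem.Chars.find (PySem.Chars.strip l) pvMarker).toNat with hqdef
  have hM1 : 1 ≤ pvMarker.length := by decide
  have hqle : q + pvMarker.length ≤ (PySem.Chars.strip l).length := by
    have h1 := hq.length_le
    rw [List.length_drop] at h1
    omega
  rw [pv_splitOnMax_pair pvMarker pvM_ne _ _ hq hqmin]
  have hfind : PySem.Chars.find l pvMarker = ((w1.length + q : Nat) : Int) := by
    apply pv_find_eq_first
    · exact (pv_occ_key l w1 w2 hw1 hw2 hl _).2 ⟨by omega, by simpa using hq⟩
    · intro i hi hcon
      obtain ⟨h1, h2⟩ := (pv_occ_key l w1 w2 hw1 hw2 hl i).1 hcon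
      exact hqmin (i - w1.length) (by omega) h2
  rw [hfind, Int.toNat_natCast]
  have hdrop : l.drop (w1.length + q + pvMarker.length)
      = (PySem.Chars.strip l).drop (q + pvMarker.length) ++ w2 := by
    conv_lhs => rw [hl]
    rw [List.append_assoc, List.drop_append, List.drop_eq_nil_of_le (by omega), List.nil_append]
    rw [show w1.length + q + pvMarker.length - w1.length = q + pvMarker.length from by omega]
    rw [List.drop_append,
      show q + pvMarker.length - (PySem.Chars.strip l).length = 0 from by omega, List.drop_zero]
  rw [show ([(PySem.Chars.strip l).take q,
      (PySem.Chars.strip l).drop (q + pvMarker.length)].getD 1 [])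
      = (PySem.Chars.strip l).drop (q + pvMarker.length) from rfl]
  rw [hdrop, pv_strip_append_ws _ w2 hw2]

-- find of '\n'
lemma pv_infix_of_drop (sub x : List Char) (i : Nat) (h : sub <+: x.drop i) : sub <:+: x :=
  (h.isInfix).trans (List.drop_suffix i x).isInfix

lemma pv_find_nl_none (x : List Char) (hx : '\n' ∉ x) : PySem.Chars.find x ['\n'] = -1 := by
  rw [PySem.Chars.find_eq_neg_one_iff]
  intro h
  exact hx (h.subset (by simp))

lemma pv_find_nl (x y : List Char) (hx : '\n' ∉ x) :
    PySem.Chars.find (x ++ '\n' :: y) ['\n'] = (x.length : Int) := by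
  apply pv_find_eq_first
  · rw [List.drop_append, Nat.sub_self, List.drop_zero, List.drop_eq_nil_of_le (le_refl _),
      List.nil_append]
    simp [List.cons_prefix_cons]
  · intro i hi hcon
    rw [List.drop_append, show i - x.length = 0 from by omega, List.drop_zero,
      List.drop_eq_getElem_cons hi, List.cons_append, List.cons_prefix_cons] at hcon
    exact hx (hcon.1 ▸ List.getElem_mem hi)

lemma pv_occ_cons_line (l rest : List Char) (i : Nat) (hi : i ≤ l.length) :
    pvMarker <+: (l ++ '\n' :: rest).drop i ↔ pvMarker <+: l.drop i := by
  rw [List.drop_append, show i - l.length = 0 from by omega, List.drop_zero]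
  exact pv_prefix_append_mid pvMarker (l.drop i) rest '\n' pvM_no_nl

lemma pv_drop_past_line (l rest : List Char) (i : Nat) (hi : l.length < i) :
    (l ++ '\n' :: rest).drop i = rest.drop (i - l.length - 1) := by
  rw [List.drop_append, List.drop_eq_nil_of_le (by omega), List.nil_append,
    show i - l.length = (i - l.length - 1) + 1 from by omega, List.drop_succ_cons]
  norm_num

-- find of the marker across the first line
lemma pv_find_line_found (l rest : List Char) (hin : pvMarker <:+: l) :
    PySem.Chars.find (l ++ '\n' :: rest) pvMarker = PySem.Chars.find l pvMarker := by
  have h0 : 0 ≤ PySem.Chars.find l pvMarker := (PySem.Chars.find_nonneg_iff _ _).2 hin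
  obtain ⟨hq, hqmin⟩ := PySem.Chars.find_spec h0
  set p := (PySem.Chars.find l pvMarker).toNat with hpdef
  have hM1 : 1 ≤ pvMarker.length := by decide
  have hple : p + pvMarker.length ≤ l.length := by
    have h1 := hq.length_le
    rw [List.length_drop] at h1
    omega
  rw [show PySem.Chars.find l pvMarker = (p : Int) from by omega]
  apply pv_find_eq_first
  · exact (pv_occ_cons_line l rest p (by omega)).2 hq
  · intro i hi hcon
    exact hqmin i hi ((pv_occ_cons_line l rest i (by omega)).1 hcon)

lemma pv_find_line_shift (l rest : List Char) (hnin : ¬ pvMarker <:+: l) (hin : pvMarker <:+: rest) :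
    PySem.Chars.find (l ++ '\n' :: rest) pvMarker
      = (l.length : Int) + 1 + PySem.Chars.find rest pvMarker := by
  have h0 : 0 ≤ PySem.Chars.find rest pvMarker := (PySem.Chars.find_nonneg_iff _ _).2 hin
  obtain ⟨hq, hqmin⟩ := PySem.Chars.find_spec h0
  set q := (PySem.Chars.find rest pvMarker).toNat with hqdef
  rw [show PySem.Chars.find rest pvMarker = (q : Int) from by omega]
  rw [show (l.length : Int) + 1 + (q : Int) = ((l.length + 1 + q : Nat) : Int) from by push_cast; ring]
  apply pv_find_eq_first
  · rw [pv_drop_past_line l rest _ (by omega),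
      show l.length + 1 + q - l.length - 1 = q from by omega]
    exact hq
  · intro i hi hcon
    by_cases hil : i ≤ l.length
    · exact hnin (pv_infix_of_drop _ _ _ ((pv_occ_cons_line l rest i hil).1 hcon))
    · rw [pv_drop_past_line l rest i (by omega)] at hcon
      exact hqmin (i - l.length - 1) (by omega) hcon

lemma pv_find_line_none (l rest : List Char) (hnin : ¬ pvMarker <:+: l) (hnin2 : ¬ pvMarker <:+: rest) :
    PySem.Chars.find (l ++ '\n' :: rest) pvMarker = -1 := by
  rw [PySem.Chars.find_eq_neg_one_iff]
  intro h
  obtain ⟨i, hi⟩ := (PySem.Chars.exists_prefix_drop_iff_isIn pvMarker _).2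
    ((PySem.Chars.isIn_iff_infix _ _).2 h)
  by_cases hil : i ≤ l.length
  · exact hnin (pv_infix_of_drop _ _ _ ((pv_occ_cons_line l rest i hil).1 hi))
  · rw [pv_drop_past_line l rest i (by omega)] at hi
    exact hnin2 (pv_infix_of_drop _ _ _ hi)

-- unfolding helpers for the two ports
lemma pvLoopA_cons (line : List Char) (rest : List (List Char)) :
    pvLoopA (line :: rest)
      = if PySem.Chars.isIn pvMarker (PySem.Chars.strip line) then
          (true, some (String.ofList (PySem.Chars.strip
            ((PySem.Chars.splitOnMax (PySem.Chars.strip line) pvMarker 1).getD 1 []))))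
        else pvLoopA rest := rfl

lemma pvBAux_none (cs : List Char) (h : PySem.Chars.find cs pvMarker = -1) :
    pvBAux cs = (false, none) := by
  simp [pvBAux, h]

lemma pvBAux_found (cs : List Char) (p : Nat) (h : PySem.Chars.find cs pvMarker = (p : Int)) :
    pvBAux cs = (true, some (String.ofList (PySem.Chars.strip (PySem.Chars.slice cs
      (some ((p : Int) + (pvMarker.length : Int)))
      (some (if PySem.Chars.findFrom cs ['\n'] (p : Int) none = -1 then (cs.length : Int)
             else PySem.Chars.findFrom cs ['\n'] (p : Int) none)))))) := by
  simp only [pvBAux, h]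
  rw [if_neg (by omega)]

-- first occurrence of the marker fits inside the hosting string
lemma pv_occ_fits (s : List Char) (hin : pvMarker <:+: s) :
    0 ≤ PySem.Chars.find s pvMarker ∧
    (PySem.Chars.find s pvMarker).toNat + pvMarker.length ≤ s.length := by
  have h0 : 0 ≤ PySem.Chars.find s pvMarker := (PySem.Chars.find_nonneg_iff _ _).2 hin
  obtain ⟨hq, _⟩ := PySem.Chars.find_spec h0
  have h1 := hq.length_le
  rw [List.length_drop] at h1
  have hM1 : 1 ≤ pvMarker.length := by decide
  exact ⟨h0, by omega⟩

-- the main list-level equivalence, by induction on the number of lines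
lemma pv_main_noNL (cs : List Char) (hnl : '\n' ∉ cs) :
    pvLoopA (PySem.Chars.splitOn cs ['\n']) = pvBAux cs := by
  rw [pv_splitOn_no '\n' cs hnl, pvLoopA_cons]
  by_cases hin : pvMarker <:+: cs
  · rw [if_pos ((PySem.Chars.isIn_iff_infix _ _).2 ((pv_infix_strip cs).2 hin))]
    obtain ⟨h0, hfits⟩ := pv_occ_fits cs hin
    set p := (PySem.Chars.find cs pvMarker).toNat with hpdef
    have hp : PySem.Chars.find cs pvMarker = (p : Int) := by omega
    rw [pvBAux_found cs p hp]
    rw [PySem.Chars.findFrom_natCast cs ['\n'] p (by omega)]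
    rw [pv_find_nl_none (cs.drop p) (fun hmem => hnl (List.mem_of_mem_drop hmem))]
    rw [if_pos rfl, if_pos rfl]
    rw [show ((p : Int) + (pvMarker.length : Int)) = ((p + pvMarker.length : Nat) : Int) from by
      push_cast; ring]
    rw [PySem.Chars.slice_eq_listSlice, PySem.List.slice_natCast]
    rw [List.take_of_length_le (by rw [List.length_drop])]
    rw [pv_extract_eq cs hin, hp, Int.toNat_natCast]
  · rw [if_neg (by
      rw [PySem.Chars.isIn_iff_infix]
      exact fun h => hin ((pv_infix_strip cs).1 h))]
    rw [pvBAux_none cs ((PySem.Chars.find_eq_neg_one_iff _ _).2 hin)]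
    rfl

lemma pv_main_cons (l rest : List Char) (hnl : '\n' ∉ l)
    (ih : pvLoopA (PySem.Chars.splitOn rest ['\n']) = pvBAux rest) :
    pvLoopA (PySem.Chars.splitOn (l ++ '\n' :: rest) ['\n']) = pvBAux (l ++ '\n' :: rest) := by
  rw [pv_splitOn_cons '\n' l rest hnl, pvLoopA_cons]
  by_cases hin : pvMarker <:+: l
  · rw [if_pos ((PySem.Chars.isIn_iff_infix _ _).2 ((pv_infix_strip l).2 hin))]
    obtain ⟨h0, hfits⟩ := pv_occ_fits l hin
    set p := (PySem.Chars.find l pvMarker).toNat with hpdef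
    have hp : PySem.Chars.find l pvMarker = (p : Int) := by omega
    have hlen : (l ++ '\n' :: rest).length = l.length + 1 + rest.length := by simp; omega
    rw [pvBAux_found _ p (by rw [pv_find_line_found l rest hin]; exact hp)]
    rw [PySem.Chars.findFrom_natCast _ ['\n'] p (by omega)]
    have hdropp : (l ++ '\n' :: rest).drop p = l.drop p ++ '\n' :: rest := by
      rw [List.drop_append, show p - l.length = 0 from by omega, List.drop_zero]
    rw [hdropp, pv_find_nl (l.drop p) rest (fun hmem => hnl (List.mem_of_mem_drop hmem))]
    rw [List.length_drop]
    rw [if_neg (by omega), if_neg (by omega)]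
    rw [show ((p : Int) + (pvMarker.length : Int)) = ((p + pvMarker.length : Nat) : Int) from by
      push_cast; ring]
    rw [show ((p : Int) + ((l.length - p : Nat) : Int)) = ((l.length : Nat) : Int) from by
      push_cast [Nat.cast_sub (by omega : p ≤ l.length)]; ring]
    rw [PySem.Chars.slice_eq_listSlice, PySem.List.slice_natCast]
    have hdrop2 : (l ++ '\n' :: rest).drop (p + pvMarker.length)
        = l.drop (p + pvMarker.length) ++ '\n' :: rest := by
      rw [List.drop_append, show p + pvMarker.length - l.length = 0 from by omega, List.drop_zero]
    rw [hdrop2, List.take_left' (by rw [List.length_drop])]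
    rw [pv_extract_eq l hin, hp, Int.toNat_natCast]
  · rw [if_neg (by
      rw [PySem.Chars.isIn_iff_infix]
      exact fun h => hin ((pv_infix_strip l).1 h))]
    rw [ih]
    by_cases hr : pvMarker <:+: rest
    · obtain ⟨h0, hfits⟩ := pv_occ_fits rest hr
      set q := (PySem.Chars.find rest pvMarker).toNat with hqdef
      have hq : PySem.Chars.find rest pvMarker = (q : Int) := by omega
      have hlen : (l ++ '\n' :: rest).length = l.length + 1 + rest.length := by simp; omega
      have hfcs : PySem.Chars.find (l ++ '\n' :: rest) pvMarker
          = ((l.length + 1 + q : Nat) : Int) := by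
        rw [pv_find_line_shift l rest hin hr, hq]; push_cast; ring
      rw [pvBAux_found _ q hq, pvBAux_found _ (l.length + 1 + q) hfcs]
      rw [PySem.Chars.findFrom_natCast _ ['\n'] (l.length + 1 + q) (by omega)]
      rw [PySem.Chars.findFrom_natCast _ ['\n'] q (by omega)]
      rw [pv_drop_past_line l rest (l.length + 1 + q) (by omega),
        show l.length + 1 + q - l.length - 1 = q from by omega]
      by_cases hrnl : PySem.Chars.find (rest.drop q) ['\n'] = -1
      · rw [hrnl]
        rw [if_pos rfl, if_pos rfl, if_pos rfl, if_pos rfl]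
        rw [show (((l.length + 1 + q : Nat) : Int) + (pvMarker.length : Int))
            = ((l.length + 1 + q + pvMarker.length : Nat) : Int) from by push_cast; ring]
        rw [show ((q : Int) + (pvMarker.length : Int))
            = ((q + pvMarker.length : Nat) : Int) from by push_cast; ring]
        rw [PySem.Chars.slice_eq_listSlice, PySem.Chars.slice_eq_listSlice]
        rw [show ((l ++ '\n' :: rest).length : Int) = (((l ++ '\n' :: rest).length : Nat) : Int) from rfl]
        rw [PySem.List.slice_natCast, PySem.List.slice_natCast]
        rw [pv_drop_past_line l rest (l.length + 1 + q + pvMarker.length) (by omega),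
          show l.length + 1 + q + pvMarker.length - l.length - 1 = q + pvMarker.length from by omega]
        rw [show (l ++ '\n' :: rest).length - (l.length + 1 + q + pvMarker.length)
            = rest.length - (q + pvMarker.length) from by omega]
      · have hr0 : 0 ≤ PySem.Chars.find (rest.drop q) ['\n'] := by
          have := PySem.Chars.neg_one_le_find (rest.drop q) ['\n']
          omega
        set r := (PySem.Chars.find (rest.drop q) ['\n']).toNat with hrdef
        have hrr : PySem.Chars.find (rest.drop q) ['\n'] = (r : Int) := by omega
        rw [hrr]
        rw [if_neg (by omega), if_neg (by omega), if_neg (by omega), if_neg (by omega)]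
        rw [show (((l.length + 1 + q : Nat) : Int) + (r : Int))
            = ((l.length + 1 + q + r : Nat) : Int) from by push_cast; ring]
        rw [show ((q : Int) + (r : Int)) = ((q + r : Nat) : Int) from by push_cast; ring]
        rw [show (((l.length + 1 + q : Nat) : Int) + (pvMarker.length : Int))
            = ((l.length + 1 + q + pvMarker.length : Nat) : Int) from by push_cast; ring]
        rw [show ((q : Int) + (pvMarker.length : Int))
            = ((q + pvMarker.length : Nat) : Int) from by push_cast; ring]
        rw [PySem.Chars.slice_eq_listSlice, PySem.Chars.slice_eq_listSlice]
        rw [PySem.List.slice_natCast, PySem.List.slice_natCast]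
        rw [pv_drop_past_line l rest (l.length + 1 + q + pvMarker.length) (by omega),
          show l.length + 1 + q + pvMarker.length - l.length - 1 = q + pvMarker.length from by omega]
        rw [show l.length + 1 + q + r - (l.length + 1 + q + pvMarker.length)
            = q + r - (q + pvMarker.length) from by omega]
    · rw [pvBAux_none _ ((PySem.Chars.find_eq_neg_one_iff _ _).2 hr)]
      rw [pvBAux_none _ (pv_find_line_none l rest hin hr)]

lemma pv_main_aux (n : Nat) : ∀ cs : List Char, cs.length ≤ n →
    pvLoopA (PySem.Chars.splitOn cs ['\n']) = pvBAux cs := by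
  induction n with
  | zero =>
    intro cs h
    have : cs = [] := List.eq_nil_of_length_eq_zero (by omega)
    subst this
    exact pv_main_noNL [] (by simp)
  | succ n ih =>
    intro cs h
    by_cases hmem : '\n' ∈ cs
    · obtain ⟨l, rest, rfl, hnl⟩ := pv_split_first '\n' cs hmem
      exact pv_main_cons l rest hnl (ih rest (by simp at h; omega))
    · exact pv_main_noNL cs hmem

lemma pv_main (cs : List Char) :
    pvLoopA (PySem.Chars.splitOn cs ['\n']) = pvBAux cs :=
  pv_main_aux cs.length cs le_rfl

-- ===== VERDICT (by name: the statement is the Claim_ definition above) =====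
theorem check_injection_record_spec : Claim_equal_check_injection_record := by
  intro content _
  show _ = _
  unfold check_injection_record check_injection_record_alt
  exact pv_main content.toList
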